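-- pv_equiv track=rewrite | github.com/shunlog/expert_system | src/expert_system/three_valued_logic.py | or3
-- ===== SOURCE A (Python) =====
-- from typing import Collection, Union
--
-- def or3(ls: Collection[Union[bool, None]]) -> Union[bool, None]:
--     if ls is iter(ls):
--         raise Exception("You gave me an iterator instead of a Collection!")
--     if any(ls):
--         return True
--     if all(i == False for i in ls):
--         return False
--     return None
-- ===== SOURCE B (Python) =====
-- def or3(ls):
--     if ls is iter(ls):
--         raise Exception("You gave me an iterator instead of a Collection!")
--     saw_none = False
--     for i in ls:
--         if i:
--             return True
--         if i != False:
--             saw_none = True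
--     return None if saw_none else False
-- ===== Notes on version B (the rewrite author's own statement) =====
-- stated objective: simpler
-- what changed: Replaces the two separate scans (any, then all) with a single pass that returns True at the first truthy element and tracks with one flag whether a None was seen, deciding None vs False after the loop.
import Mathlib
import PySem

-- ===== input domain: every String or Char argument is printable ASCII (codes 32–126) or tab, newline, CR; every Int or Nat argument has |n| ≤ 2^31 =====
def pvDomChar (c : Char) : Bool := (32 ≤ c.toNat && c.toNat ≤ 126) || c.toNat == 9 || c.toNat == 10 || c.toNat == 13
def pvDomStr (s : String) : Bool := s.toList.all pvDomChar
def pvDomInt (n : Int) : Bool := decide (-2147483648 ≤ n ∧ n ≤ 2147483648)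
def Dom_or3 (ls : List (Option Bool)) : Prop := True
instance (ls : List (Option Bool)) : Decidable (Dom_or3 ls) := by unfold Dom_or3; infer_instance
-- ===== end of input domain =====

-- B: one pass with a single seen-None flag instead of separate any/all scans (simpler).
-- ===== PORT A =====
-- 'any(ls)': an element is truthy only when it is True; 'i == False': only False compares equal
def or3 (ls : List (Option Bool)) : Option Bool :=
  if ls.any (fun i => i == some true) then some true
  else if ls.all (fun i => i == some false) then some false
  else none

-- ===== PORT B =====
-- single pass: return True at first truthy element; flag records whether a None was seen
def or3AltLoop (ls : List (Option Bool)) (sawNone : Bool) : Option Bool :=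
  match ls with
  | [] => if sawNone then none else some false
  | i :: rest =>
    if i == some true then some true
    else or3AltLoop rest (if i != some false then true else sawNone)

def or3_alt (ls : List (Option Bool)) : Option Bool := or3AltLoop ls false

-- ===== PRECONDITION & SPEC =====
def Spec_or3 (ls : List (Option Bool)) (out : Option Bool) : Prop := out = or3_alt ls
instance (ls : List (Option Bool)) (out : Option Bool) : Decidable (Spec_or3 ls out) := by unfold Spec_or3; infer_instance

-- ===== CLAIM (what is proved, stated in full; the proofs are below) =====
def Claim_equal_or3 : Prop := ∀ (ls : List (Option Bool)), Dom_or3 ls → Spec_or3 ls (or3 ls)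

-- ===== LEMMAS AND PROOFS =====

-- ===== VERDICT (by name: the statement is the Claim_ definition above) =====
lemma or3AltLoop_spec (ls : List (Option Bool)) (f : Bool) :
    or3AltLoop ls f =
      if ls.any (fun i => i == some true) then some true
      else if f || !(ls.all (fun i => i == some false)) then none
      else some false := by
  induction ls generalizing f with
  | nil => simp [or3AltLoop]
  | cons i rest ih =>
    cases i with
    | none => simp [or3AltLoop, ih]
    | some b => cases b <;> simp [or3AltLoop, ih]

theorem or3_spec : Claim_equal_or3 := by
  intro ls _
  unfold Spec_or3
  show _ = or3_alt ls
  unfold or3 or3_alt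
  rw [or3AltLoop_spec]
  by_cases h : ls.any (fun i => i == some true) <;>
    by_cases h2 : ls.all (fun i => i == some false) <;> simp [h, h2]
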